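-- pv_equiv track=rewrite | github.com/zdxdsw/skewed_relations_T2I | scripts/formalism/dataset.py | create_data_split19
-- ===== SOURCE A (Python) =====
-- def create_data_split19(nouns):
--     train_triplets, test_triplets = [], []
--     cut = 2*len(nouns) // 5
--     for i, _A in enumerate(nouns):
--         for j, _B in enumerate(nouns):
--             if i==j: continue
--
--             if i < cut:
--                 if j < cut:
--                     test_triplets.append((i, j, 0))
--                     test_triplets.append((i, j, 1))
--                 else:
--                     train_triplets.append((i, j, 0))
--                     test_triplets.append((i, j, 1))
--             elif cut <= i < len(nouns) - cut:
--                 if j < cut: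
--                     test_triplets.append((i, j, 0))
--                     train_triplets.append((i, j, 1))
--                 elif cut <= j < len(nouns) - cut:
--                     train_triplets.append((i, j, 0))
--                     train_triplets.append((i, j, 1))
--                 else:
--                     train_triplets.append((i, j, 0))
--                     test_triplets.append((i, j, 1))
--             else:
--                 if j < len(nouns) - cut:
--                     test_triplets.append((i, j, 0))
--                     train_triplets.append((i, j, 1))
--                 else:
--                     test_triplets.append((i, j, 0))
--                     test_triplets.append((i, j, 1))
--
--     return train_triplets, test_triplets
-- ===== SOURCE B (Python) =====
-- def create_data_split19(nouns):
--     n = len(nouns)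
--     cut = 2*n // 5
--     mid = n - cut
--     train, test = [], []
--     # Build each output list directly, row by row, from range arithmetic:
--     # for each i the set of j's feeding train/test is a union of contiguous
--     # j-ranges determined by i's block, so no per-pair branch dispatch is needed.
--     for i in range(n):
--         if i < cut:
--             train += [(i, j, 0) for j in range(cut, n)]
--             test += [t for j in range(cut) if j != i for t in ((i, j, 0), (i, j, 1))]
--             test += [(i, j, 1) for j in range(cut, n)]
--         elif i < mid:
--             train += [(i, j, 1) for j in range(cut)]
--             train += [t for j in range(cut, mid) if j != i for t in ((i, j, 0), (i, j, 1))]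
--             train += [(i, j, 0) for j in range(mid, n)]
--             test += [(i, j, 0) for j in range(cut)]
--             test += [(i, j, 1) for j in range(mid, n)]
--         else:
--             train += [(i, j, 1) for j in range(mid)]
--             test += [(i, j, 0) for j in range(mid)]
--             test += [t for j in range(mid, n) if j != i for t in ((i, j, 0), (i, j, 1))]
--     return train, test
-- ===== Notes on version B (the rewrite author's own statement) =====
-- stated objective: alternative
-- what changed: Instead of routing each (i,j,0/1) pair through a branch tree inside a full n-by-n double loop, B builds the two output lists directly: for each row i it emits whole contiguous j-range segments (via range arithmetic on the three index blocks) into train and test separately, so there is no per-pair destination dispatch.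
import Mathlib
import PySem

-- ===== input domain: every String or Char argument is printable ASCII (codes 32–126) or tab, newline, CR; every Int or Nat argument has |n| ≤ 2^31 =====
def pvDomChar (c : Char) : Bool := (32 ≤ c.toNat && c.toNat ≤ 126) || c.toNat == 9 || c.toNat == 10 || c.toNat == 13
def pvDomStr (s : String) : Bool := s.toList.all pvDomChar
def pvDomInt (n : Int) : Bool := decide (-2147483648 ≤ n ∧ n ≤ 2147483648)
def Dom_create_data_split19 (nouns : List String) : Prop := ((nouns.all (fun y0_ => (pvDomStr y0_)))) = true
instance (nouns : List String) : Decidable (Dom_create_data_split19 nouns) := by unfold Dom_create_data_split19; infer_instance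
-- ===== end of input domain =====

-- B builds train/test directly per row i from contiguous j-range segments (range arithmetic
-- on the three index blocks) instead of A's per-pair branch dispatch; same O(n^2) cost.

-- ===== PORT A =====
def create_data_split19 (nouns : List String) : (List (Int × Int × Int)) × (List (Int × Int × Int)) :=
  let n : Int := nouns.length
  let cut : Int := PySem.Int.floordiv (2 * n) 5
  (PySem.List.enumerate nouns 0).foldl (fun st p =>
    (PySem.List.enumerate nouns 0).foldl (fun st q =>
      let i := p.1
      let j := q.1
      if i = j then st
      else if i < cut then
        if j < cut then (st.1, st.2 ++ [(i, j, 0), (i, j, 1)])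
        else (st.1 ++ [(i, j, 0)], st.2 ++ [(i, j, 1)])
      else if cut ≤ i ∧ i < n - cut then
        if j < cut then (st.1 ++ [(i, j, 1)], st.2 ++ [(i, j, 0)])
        else if cut ≤ j ∧ j < n - cut then (st.1 ++ [(i, j, 0), (i, j, 1)], st.2)
        else (st.1 ++ [(i, j, 0)], st.2 ++ [(i, j, 1)])
      else
        if j < n - cut then (st.1 ++ [(i, j, 1)], st.2 ++ [(i, j, 0)])
        else (st.1, st.2 ++ [(i, j, 0), (i, j, 1)])) st)
    ([], [])

-- ===== PORT B =====
def create_data_split19_alt (nouns : List String) : (List (Int × Int × Int)) × (List (Int × Int × Int)) :=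
  let n : Int := nouns.length
  let cut : Int := PySem.Int.floordiv (2 * n) 5
  let mid : Int := n - cut
  (PySem.List.pyRange 0 n 1).foldl (fun st i =>
    if i < cut then
      (st.1 ++ (PySem.List.pyRange cut n 1).map (fun j => (i, j, (0:Int))),
       st.2 ++ ((PySem.List.pyRange 0 cut 1).filter (fun j => j ≠ i)).flatMap
                 (fun j => [(i, j, (0:Int)), (i, j, 1)])
            ++ (PySem.List.pyRange cut n 1).map (fun j => (i, j, (1:Int))))
    else if i < mid then
      (st.1 ++ (PySem.List.pyRange 0 cut 1).map (fun j => (i, j, (1:Int)))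
            ++ ((PySem.List.pyRange cut mid 1).filter (fun j => j ≠ i)).flatMap
                 (fun j => [(i, j, (0:Int)), (i, j, 1)])
            ++ (PySem.List.pyRange mid n 1).map (fun j => (i, j, (0:Int))),
       st.2 ++ (PySem.List.pyRange 0 cut 1).map (fun j => (i, j, (0:Int)))
            ++ (PySem.List.pyRange mid n 1).map (fun j => (i, j, (1:Int))))
    else
      (st.1 ++ (PySem.List.pyRange 0 mid 1).map (fun j => (i, j, (1:Int))),
       st.2 ++ (PySem.List.pyRange 0 mid 1).map (fun j => (i, j, (0:Int)))
            ++ ((PySem.List.pyRange mid n 1).filter (fun j => j ≠ i)).flatMap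
                 (fun j => [(i, j, (0:Int)), (i, j, 1)])))
    ([], [])

-- ===== PRECONDITION & SPEC =====
def Spec_create_data_split19 (nouns : List String) (out : (List (Int × Int × Int)) × (List (Int × Int × Int))) : Prop := out = create_data_split19_alt nouns
instance (nouns : List String) (out : (List (Int × Int × Int)) × (List (Int × Int × Int))) : Decidable (Spec_create_data_split19 nouns out) := by unfold Spec_create_data_split19; infer_instance

-- ===== CLAIM =====
def Claim_equal_create_data_split19 : Prop := ∀ (nouns : List String), Dom_create_data_split19 nouns → Spec_create_data_split19 nouns (create_data_split19 nouns)

-- ===== LEMMAS AND PROOFS =====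

-- what A appends to train at pair (i, j)
def pvFA (cut n i j : Int) : List (Int × Int × Int) :=
  if i = j then []
  else if i < cut then (if j < cut then [] else [(i, j, 0)])
  else if cut ≤ i ∧ i < n - cut then
    if j < cut then [(i, j, 1)]
    else if cut ≤ j ∧ j < n - cut then [(i, j, 0), (i, j, 1)]
    else [(i, j, 0)]
  else (if j < n - cut then [(i, j, 1)] else [])

-- what A appends to test at pair (i, j)
def pvGA (cut n i j : Int) : List (Int × Int × Int) :=
  if i = j then []
  else if i < cut then (if j < cut then [(i, j, 0), (i, j, 1)] else [(i, j, 1)])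
  else if cut ≤ i ∧ i < n - cut then
    if j < cut then [(i, j, 0)]
    else if cut ≤ j ∧ j < n - cut then []
    else [(i, j, 1)]
  else (if j < n - cut then [(i, j, 0)] else [(i, j, 0), (i, j, 1)])

theorem pv_flatMap_congr {α β : Type} (l : List α) (f g : α → List β)
    (h : ∀ x ∈ l, f x = g x) : l.flatMap f = l.flatMap g := by
  induction l with
  | nil => rfl
  | cons x xs ih =>
      simp only [List.flatMap_cons]
      rw [h x (List.mem_cons_self), ih (fun y hy => h y (List.mem_cons_of_mem _ hy))]

theorem pv_filter_flatMap {α β : Type} (l : List α) (p : α → Bool) (g : α → List β) :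
    (l.filter p).flatMap g = l.flatMap (fun x => if p x then g x else []) := by
  induction l with
  | nil => rfl
  | cons x xs ih => by_cases h : p x <;> simp [h, ih]

theorem pv_map_eq_flatMap {α β : Type} (l : List α) (f : α → β) :
    l.map f = l.flatMap (fun x => [f x]) := by
  induction l with
  | nil => rfl
  | cons x xs ih => simp [ih]

-- A's inner loop body equals the 'append f / append g' form
theorem pv_bodyA (cut n i j : Int)
    (st : (List (Int × Int × Int)) × (List (Int × Int × Int))) :
    (if i = j then st
      else if i < cut then
        if j < cut then (st.1, st.2 ++ [(i, j, 0), (i, j, 1)])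
        else (st.1 ++ [(i, j, 0)], st.2 ++ [(i, j, 1)])
      else if cut ≤ i ∧ i < n - cut then
        if j < cut then (st.1 ++ [(i, j, 1)], st.2 ++ [(i, j, 0)])
        else if cut ≤ j ∧ j < n - cut then (st.1 ++ [(i, j, 0), (i, j, 1)], st.2)
        else (st.1 ++ [(i, j, 0)], st.2 ++ [(i, j, 1)])
      else
        if j < n - cut then (st.1 ++ [(i, j, 1)], st.2 ++ [(i, j, 0)])
        else (st.1, st.2 ++ [(i, j, 0), (i, j, 1)])) =
    (st.1 ++ pvFA cut n i j, st.2 ++ pvGA cut n i j) := by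
  unfold pvFA pvGA
  split_ifs <;> simp

-- A's train row over the full range equals B's segmented train row
theorem pv_rowTrain (cut n i : Int) (h0 : 0 ≤ cut) (h1 : cut + cut ≤ n)
    (hi0 : 0 ≤ i) (hi1 : i < n) :
    (PySem.List.pyRange 0 n 1).flatMap (pvFA cut n i) =
    (if i < cut then
        (PySem.List.pyRange cut n 1).map (fun j => (i, j, (0:Int)))
      else if i < n - cut then
        (PySem.List.pyRange 0 cut 1).map (fun j => (i, j, (1:Int)))
          ++ ((PySem.List.pyRange cut (n - cut) 1).filter (fun j => j ≠ i)).flatMap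
               (fun j => [(i, j, (0:Int)), (i, j, 1)])
          ++ (PySem.List.pyRange (n - cut) n 1).map (fun j => (i, j, (0:Int)))
      else (PySem.List.pyRange 0 (n - cut) 1).map (fun j => (i, j, (1:Int)))) := by
  rw [PySem.List.pyRange_one_append 0 cut n h0 (by omega),
      PySem.List.pyRange_one_append cut (n - cut) n (by omega) (by omega),
      List.flatMap_append, List.flatMap_append]
  split_ifs with hc hm
  · -- i < cut : segment [0,cut) and [cut,n-cut) contribute [] or [(i,j,0)]
    rw [pv_flatMap_congr (PySem.List.pyRange 0 cut 1) _ (fun _ => [])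
          (fun j hj => by
            have := PySem.List.mem_pyRange_one.mp hj
            unfold pvFA; split_ifs <;> first | rfl | omega),
        pv_flatMap_congr (PySem.List.pyRange cut (n-cut) 1) _ (fun j => [(i, j, (0:Int))])
          (fun j hj => by
            have := PySem.List.mem_pyRange_one.mp hj
            unfold pvFA; split_ifs <;> first | rfl | omega),
        pv_flatMap_congr (PySem.List.pyRange (n-cut) n 1) _ (fun j => [(i, j, (0:Int))])
          (fun j hj => by
            have := PySem.List.mem_pyRange_one.mp hj
            unfold pvFA; split_ifs <;> first | rfl | omega)]
    simp [pv_map_eq_flatMap]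
  · -- middle i
    rw [pv_flatMap_congr (PySem.List.pyRange 0 cut 1) _ (fun j => [(i, j, (1:Int))])
          (fun j hj => by
            have := PySem.List.mem_pyRange_one.mp hj
            unfold pvFA; split_ifs <;> first | rfl | omega),
        pv_flatMap_congr (PySem.List.pyRange cut (n-cut) 1) _
          (fun j => if j ≠ i then [(i, j, (0:Int)), (i, j, 1)] else [])
          (fun j hj => by
            have := PySem.List.mem_pyRange_one.mp hj
            unfold pvFA; split_ifs <;> simp_all <;> omega),
        pv_flatMap_congr (PySem.List.pyRange (n-cut) n 1) _ (fun j => [(i, j, (0:Int))])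
          (fun j hj => by
            have := PySem.List.mem_pyRange_one.mp hj
            unfold pvFA; split_ifs <;> first | rfl | omega)]
    simp [pv_map_eq_flatMap, pv_filter_flatMap]
  · -- right i
    rw [pv_flatMap_congr (PySem.List.pyRange 0 cut 1) _ (fun j => [(i, j, (1:Int))])
          (fun j hj => by
            have := PySem.List.mem_pyRange_one.mp hj
            unfold pvFA; split_ifs <;> first | rfl | omega),
        pv_flatMap_congr (PySem.List.pyRange cut (n-cut) 1) _ (fun j => [(i, j, (1:Int))])
          (fun j hj => by
            have := PySem.List.mem_pyRange_one.mp hj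
            unfold pvFA; split_ifs <;> first | rfl | omega),
        pv_flatMap_congr (PySem.List.pyRange (n-cut) n 1) _ (fun _ => [])
          (fun j hj => by
            have := PySem.List.mem_pyRange_one.mp hj
            unfold pvFA; split_ifs <;> first | rfl | omega)]
    rw [PySem.List.pyRange_one_append 0 cut (n - cut) h0 (by omega)]
    simp [pv_map_eq_flatMap]

-- A's test row over the full range equals B's segmented test row
theorem pv_rowTest (cut n i : Int) (h0 : 0 ≤ cut) (h1 : cut + cut ≤ n)
    (hi0 : 0 ≤ i) (hi1 : i < n) :
    (PySem.List.pyRange 0 n 1).flatMap (pvGA cut n i) =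
    (if i < cut then
        ((PySem.List.pyRange 0 cut 1).filter (fun j => j ≠ i)).flatMap
            (fun j => [(i, j, (0:Int)), (i, j, 1)])
          ++ (PySem.List.pyRange cut n 1).map (fun j => (i, j, (1:Int)))
      else if i < n - cut then
        (PySem.List.pyRange 0 cut 1).map (fun j => (i, j, (0:Int)))
          ++ (PySem.List.pyRange (n - cut) n 1).map (fun j => (i, j, (1:Int)))
      else (PySem.List.pyRange 0 (n - cut) 1).map (fun j => (i, j, (0:Int)))
          ++ ((PySem.List.pyRange (n - cut) n 1).filter (fun j => j ≠ i)).flatMap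
               (fun j => [(i, j, (0:Int)), (i, j, 1)])) := by
  rw [PySem.List.pyRange_one_append 0 cut n h0 (by omega),
      PySem.List.pyRange_one_append cut (n - cut) n (by omega) (by omega),
      List.flatMap_append, List.flatMap_append]
  split_ifs with hc hm
  · rw [pv_flatMap_congr (PySem.List.pyRange 0 cut 1) _
          (fun j => if j ≠ i then [(i, j, (0:Int)), (i, j, 1)] else [])
          (fun j hj => by
            have := PySem.List.mem_pyRange_one.mp hj
            unfold pvGA; split_ifs <;> simp_all <;> omega),
        pv_flatMap_congr (PySem.List.pyRange cut (n-cut) 1) _ (fun j => [(i, j, (1:Int))])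
          (fun j hj => by
            have := PySem.List.mem_pyRange_one.mp hj
            unfold pvGA; split_ifs <;> first | rfl | omega),
        pv_flatMap_congr (PySem.List.pyRange (n-cut) n 1) _ (fun j => [(i, j, (1:Int))])
          (fun j hj => by
            have := PySem.List.mem_pyRange_one.mp hj
            unfold pvGA; split_ifs <;> first | rfl | omega)]
    simp [pv_map_eq_flatMap, pv_filter_flatMap]
  · rw [pv_flatMap_congr (PySem.List.pyRange 0 cut 1) _ (fun j => [(i, j, (0:Int))])
          (fun j hj => by
            have := PySem.List.mem_pyRange_one.mp hj
            unfold pvGA; split_ifs <;> first | rfl | omega),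
        pv_flatMap_congr (PySem.List.pyRange cut (n-cut) 1) _ (fun _ => [])
          (fun j hj => by
            have := PySem.List.mem_pyRange_one.mp hj
            unfold pvGA; split_ifs <;> first | rfl | omega),
        pv_flatMap_congr (PySem.List.pyRange (n-cut) n 1) _ (fun j => [(i, j, (1:Int))])
          (fun j hj => by
            have := PySem.List.mem_pyRange_one.mp hj
            unfold pvGA; split_ifs <;> first | rfl | omega)]
    simp [pv_map_eq_flatMap]
  · rw [pv_flatMap_congr (PySem.List.pyRange 0 cut 1) _ (fun j => [(i, j, (0:Int))])
          (fun j hj => by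
            have := PySem.List.mem_pyRange_one.mp hj
            unfold pvGA; split_ifs <;> first | rfl | omega),
        pv_flatMap_congr (PySem.List.pyRange cut (n-cut) 1) _ (fun j => [(i, j, (0:Int))])
          (fun j hj => by
            have := PySem.List.mem_pyRange_one.mp hj
            unfold pvGA; split_ifs <;> first | rfl | omega),
        pv_flatMap_congr (PySem.List.pyRange (n-cut) n 1) _
          (fun j => if j ≠ i then [(i, j, (0:Int)), (i, j, 1)] else [])
          (fun j hj => by
            have := PySem.List.mem_pyRange_one.mp hj
            unfold pvGA; split_ifs <;> simp_all <;> omega)]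
    rw [PySem.List.pyRange_one_append 0 cut (n - cut) h0 (by omega)]
    simp [pv_map_eq_flatMap, pv_filter_flatMap]

-- A's inner loop, as one equation
theorem pv_inner (cut n i : Int) (l : List Int)
    (st : (List (Int × Int × Int)) × (List (Int × Int × Int))) :
    l.foldl (fun st j =>
      if i = j then st
      else if i < cut then
        if j < cut then (st.1, st.2 ++ [(i, j, 0), (i, j, 1)])
        else (st.1 ++ [(i, j, 0)], st.2 ++ [(i, j, 1)])
      else if cut ≤ i ∧ i < n - cut then
        if j < cut then (st.1 ++ [(i, j, 1)], st.2 ++ [(i, j, 0)])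
        else if cut ≤ j ∧ j < n - cut then (st.1 ++ [(i, j, 0), (i, j, 1)], st.2)
        else (st.1 ++ [(i, j, 0)], st.2 ++ [(i, j, 1)])
      else
        if j < n - cut then (st.1 ++ [(i, j, 1)], st.2 ++ [(i, j, 0)])
        else (st.1, st.2 ++ [(i, j, 0), (i, j, 1)])) st =
    (st.1 ++ l.flatMap (pvFA cut n i), st.2 ++ l.flatMap (pvGA cut n i)) := by
  induction l generalizing st with
  | nil => simp
  | cons x xs ih =>
      simp only [List.foldl_cons, List.flatMap_cons]
      rw [pv_bodyA, ih]
      simp [List.append_assoc]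

-- ===== VERDICT =====
theorem create_data_split19_spec : Claim_equal_create_data_split19 := by
  intro nouns _
  unfold Spec_create_data_split19 create_data_split19 create_data_split19_alt
  have hcut : PySem.Int.floordiv (2 * (nouns.length : Int)) 5 =
      ((2 * nouns.length / 5 : Nat) : Int) := by
    have h := PySem.Int.floordiv_natCast (2 * nouns.length) 5
    push_cast at h ⊢
    linarith [h]
  have h0 : 0 ≤ PySem.Int.floordiv (2 * (nouns.length : Int)) 5 := by
    rw [hcut]; positivity
  have h1 : PySem.Int.floordiv (2 * (nouns.length : Int)) 5 +
      PySem.Int.floordiv (2 * (nouns.length : Int)) 5 ≤ (nouns.length : Int) := by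
    rw [hcut]; push_cast; omega
  simp only [PySem.List.enumerate_eq_map_pyRange (d := ""), List.foldl_map, PySem.List.len]
  apply PySem.List.foldl_congr_mem
  intro st i hi
  have hib := PySem.List.mem_pyRange_one.mp hi
  rw [pv_inner,
      pv_rowTrain _ _ i h0 h1 hib.1 hib.2,
      pv_rowTest _ _ i h0 h1 hib.1 hib.2]
  split_ifs <;> simp
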